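-- pv_equiv track=rewrite | github.com/nmoynihan/amplitudes-sr | rdklt/mandelstams.py | generate_mandelstam_labels
-- ===== SOURCE A (Python) =====
-- import itertools
--
-- def canonical_subset(subset, n):
--     """
--     Canonical representative for s_I = s_complement(I).
--     Returns the lexicographically smaller of subset and complement.
--     """
--     comp = tuple(i for i in range(1, n + 1) if i not in subset)
--     if len(subset) < len(comp):
--         return subset
--     if len(subset) > len(comp):
--         return comp
--     return min(subset, comp)
--
-- def generate_mandelstam_labels(n, max_subset_size=2):
--     """
--     Generate all distinct Mandelstam labels s_I for subsets 2 <= |I| <= max_subset_size,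
--     identifying s_I with s_complement(I).
--     """
--     labels = []
--     seen = set()
--     upper = min(max_subset_size, n - 2)
--
--     for k in range(2, upper + 1):
--         for subset in itertools.combinations(range(1, n + 1), k):
--             canon = canonical_subset(subset, n)
--             if canon not in seen:
--                 seen.add(canon)
--                 labels.append(canon)
--     return labels
-- ===== SOURCE B (Python) =====
-- import itertools
--
-- def generate_mandelstam_labels(n, max_subset_size=2):
--     """Emit the distinct Mandelstam labels directly, without any dedup state:
--     for k below n/2 every k-subset is its own canonical label; at k == n/2
--     exactly the subsets containing 1 are canonical (they are lex-smaller than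
--     their complement); for k above n/2 every canonical was already emitted."""
--     upper = min(max_subset_size, n - 2)
--     labels = []
--     for k in range(2, upper + 1):
--         if 2 * k < n:
--             labels.extend(itertools.combinations(range(1, n + 1), k))
--         elif 2 * k == n:
--             labels.extend((1,) + rest
--                           for rest in itertools.combinations(range(2, n + 1), k - 1))
--     return labels
-- ===== Notes on version B (the rewrite author's own statement) =====
-- stated objective: alternative
-- what changed: B removes A's seen-set deduplication and per-subset canonicalization entirely: it emits the labels directly, taking every k-subset while 2k < n, only the subsets containing 1 (1-prefixed combinations of {2..n}) when 2k = n, and skipping k when 2k > n, producing the identical list in the identical order without any dedup state.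
import Mathlib
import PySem

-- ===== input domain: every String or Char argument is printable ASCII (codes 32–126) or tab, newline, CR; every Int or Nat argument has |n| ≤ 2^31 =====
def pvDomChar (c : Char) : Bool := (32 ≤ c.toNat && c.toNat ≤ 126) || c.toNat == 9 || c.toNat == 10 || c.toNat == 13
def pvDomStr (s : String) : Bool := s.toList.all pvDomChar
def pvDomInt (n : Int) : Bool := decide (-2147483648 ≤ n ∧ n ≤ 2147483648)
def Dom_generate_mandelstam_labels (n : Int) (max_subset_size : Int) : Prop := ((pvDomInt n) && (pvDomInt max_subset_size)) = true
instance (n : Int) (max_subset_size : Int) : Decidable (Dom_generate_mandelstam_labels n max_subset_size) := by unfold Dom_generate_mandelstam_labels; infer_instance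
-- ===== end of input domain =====

-- B drops A's `seen`-set deduplication entirely and emits the labels directly
-- (all k-subsets while 2k < n, the subsets containing 1 when 2k = n, nothing when
-- 2k > n): no per-subset complement construction or set lookups.

-- ===== PORT A =====
-- Python tuple comparison subset <= comp (as used by min(subset, comp): min returns
-- the first argument on a tie).
def pyLexLe : List Int → List Int → Bool
  | [], _ => true
  | _ :: _, [] => false
  | x :: xs, y :: ys => if x < y then true else if y < x then false else pyLexLe xs ys

-- comp = tuple(i for i in range(1, n + 1) if i not in subset)
def pyComplement (subset : List Int) (n : Int) : List Int :=
  (PySem.List.pyRange 1 (n + 1) 1).filter (fun i => !subset.contains i)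

def canonical_subset (subset : List Int) (n : Int) : List Int :=
  let comp := pyComplement subset n
  if subset.length < comp.length then subset
  else if comp.length < subset.length then comp
  else if pyLexLe subset comp then subset else comp

-- body of the inner `for subset in itertools.combinations(...)` loop
def mandelStep (n : Int) (st : List (List Int) × PySem.Set (List Int)) (subset : List Int) :
    List (List Int) × PySem.Set (List Int) :=
  let canon := canonical_subset subset n
  if canon ∈ st.2 then st else (st.1 ++ [canon], PySem.Set.add st.2 canon)

-- body of the outer `for k in range(2, upper + 1)` loop
def mandelBlock (n : Int) (st : List (List Int) × PySem.Set (List Int)) (k : Int) :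
    List (List Int) × PySem.Set (List Int) :=
  (PySem.List.combinations (PySem.List.pyRange 1 (n + 1) 1) k.toNat).foldl (mandelStep n) st

def generate_mandelstam_labels (n : Int) (max_subset_size : Int) : List (List Int) :=
  let upper := min max_subset_size (n - 2)
  ((PySem.List.pyRange 2 (upper + 1) 1).foldl (mandelBlock n)
      (([] : List (List Int)), (PySem.Set.empty : PySem.Set (List Int)))).1

-- ===== PORT B =====
-- body of B's `for k in range(2, upper + 1)` loop: extend without any dedup state
def mandelBlockAlt (n : Int) (labels : List (List Int)) (k : Int) : List (List Int) :=
  if 2 * k < n then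
    labels ++ PySem.List.combinations (PySem.List.pyRange 1 (n + 1) 1) k.toNat
  else if 2 * k = n then
    labels ++ (PySem.List.combinations (PySem.List.pyRange 2 (n + 1) 1) (k.toNat - 1)).map
      (fun rest => 1 :: rest)
  else labels

def generate_mandelstam_labels_alt (n : Int) (max_subset_size : Int) : List (List Int) :=
  let upper := min max_subset_size (n - 2)
  (PySem.List.pyRange 2 (upper + 1) 1).foldl (mandelBlockAlt n) []

-- ===== PRECONDITION & SPEC =====
def Spec_generate_mandelstam_labels (n : Int) (max_subset_size : Int) (out : List (List Int)) : Prop := out = generate_mandelstam_labels_alt n max_subset_size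
instance (n : Int) (max_subset_size : Int) (out : List (List Int)) : Decidable (Spec_generate_mandelstam_labels n max_subset_size out) := by unfold Spec_generate_mandelstam_labels; infer_instance

-- ===== CLAIM (what is proved, stated in full; the proofs are below) =====
def Claim_equal_generate_mandelstam_labels : Prop := ∀ (n : Int) (max_subset_size : Int), Dom_generate_mandelstam_labels n max_subset_size → Spec_generate_mandelstam_labels n max_subset_size (generate_mandelstam_labels n max_subset_size)

-- ===== LEMMAS AND PROOFS =====

-- the labels emitted by the blocks k' < K: canonical representatives, by block
def Emit (n K : Int) (x : List Int) : Prop :=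
  ∃ j : Nat, 2 ≤ (j : Int) ∧ (j : Int) < K ∧
    x ∈ PySem.List.combinations (PySem.List.pyRange 1 (n + 1) 1) j ∧ canonical_subset x n = x

-- strict lexicographic order is irreflexive
theorem lex_irrefl (a : List Int) : ¬ List.Lex (· < ·) a a := by
  induction a with
  | nil => intro h; cases h
  | cons x xs ih => intro h; cases h with
    | cons h => exact ih h
    | rel h => exact lt_irrefl _ h

-- combinations of a strictly increasing list are strictly lex-increasing
theorem pairwise_lex_combinations (l : List Int) (hl : l.Pairwise (· < ·)) (r : Nat) :
    (PySem.List.combinations l r).Pairwise (List.Lex (· < ·)) := by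
  induction l generalizing r with
  | nil => cases r with
    | zero => simp [PySem.List.combinations_zero]
    | succ r => simp [PySem.List.combinations_nil_succ]
  | cons x xs ih =>
    cases r with
    | zero => simp [PySem.List.combinations_zero]
    | succ r =>
      rw [PySem.List.combinations_cons_succ]
      have hxs : xs.Pairwise (· < ·) := hl.of_cons
      have hx : ∀ y ∈ xs, x < y := fun y hy => (List.pairwise_cons.mp hl).1 y hy
      rw [List.pairwise_append]
      refine ⟨(ih hxs r).map _ (fun a b hab => List.Lex.cons hab), ih hxs (r + 1), ?_⟩
      intro a ha b hb
      obtain ⟨u, hu, rfl⟩ := List.mem_map.mp ha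
      have hsub := PySem.List.sublist_of_mem_combinations hb
      have hlen := PySem.List.length_of_mem_combinations hb
      cases b with
      | nil => simp at hlen
      | cons y b' =>
        have hy : y ∈ xs := hsub.subset (by simp)
        exact List.Lex.rel (hx y hy)

-- elements of a combination of pyRange 1 (n+1) 1
theorem comb_mem_facts {n : Int} {K : Nat} {t : List Int}
    (ht : t ∈ PySem.List.combinations (PySem.List.pyRange 1 (n + 1) 1) K) :
    t.Sublist (PySem.List.pyRange 1 (n + 1) 1) ∧ t.length = K ∧ t.Pairwise (· < ·) ∧
      ∀ x ∈ t, 1 ≤ x ∧ x ≤ n := by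
  have hsub := PySem.List.sublist_of_mem_combinations ht
  refine ⟨hsub, PySem.List.length_of_mem_combinations ht,
    (PySem.List.pairwise_lt_pyRange_one 1 (n+1)).sublist hsub, fun x hx => ?_⟩
  have := PySem.List.mem_pyRange_one.mp (hsub.subset hx)
  omega

-- if 1 ∈ t then t starts with 1
theorem head_one {t : List Int} (hp : t.Pairwise (· < ·)) (hall : ∀ x ∈ t, 1 ≤ x)
    (h1 : (1 : Int) ∈ t) : ∃ tt, t = 1 :: tt := by
  cases t with
  | nil => simp at h1
  | cons h tt =>
    rcases List.mem_cons.mp h1 with rfl | hmem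
    · exact ⟨tt, rfl⟩
    · have := (List.pairwise_cons.mp hp).1 1 hmem
      have := hall h (by simp)
      omega

-- filter by membership of a nodup-sublist recovers it
theorem filter_contains_of_sublist {t l : List Int} (h : t.Sublist l) (hl : l.Nodup) :
    l.filter (fun x => t.contains x) = t := by
  induction h with
  | slnil => simp
  | @cons t l a h ih =>
    have ha : a ∉ l := (List.nodup_cons.mp hl).1
    have hat : ¬ t.contains a := by
      simp only [List.contains_iff_mem]
      exact fun hmem => ha (h.subset hmem)
    simp only [List.filter_cons, hat]
    simpa using ih (List.nodup_cons.mp hl).2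
  | @cons₂ t l a h ih =>
    have ha : a ∉ l := (List.nodup_cons.mp hl).1
    have : l.filter (fun x => (a :: t).contains x) = l.filter (fun x => t.contains x) := by
      apply List.filter_congr
      intro x hx
      have hxa : x ≠ a := fun he => ha (he ▸ hx)
      simp [hxa]
    simp only [List.filter_cons]
    rw [this, ih (List.nodup_cons.mp hl).2]
    simp

theorem complement_length {n : Int} {t : List Int}
    (h : t.Sublist (PySem.List.pyRange 1 (n + 1) 1)) :
    (pyComplement t n).length = n.toNat - t.length := by
  have hnd : (PySem.List.pyRange 1 (n + 1) 1).Nodup := PySem.List.nodup_pyRange_one 1 (n+1)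
  have hlen := (List.length_eq_length_filter_add (l := PySem.List.pyRange 1 (n + 1) 1)
    (fun x => t.contains x)).symm
  rw [filter_contains_of_sublist h hnd] at hlen
  have hR : (PySem.List.pyRange 1 (n + 1) 1).length = n.toNat := by
    rw [PySem.List.length_pyRange_one]; omega
  unfold pyComplement
  omega


theorem canon_lt {n : Int} {K : Nat} {t : List Int} (h2 : 2 ≤ (K : Int))
    (ht : t ∈ PySem.List.combinations (PySem.List.pyRange 1 (n + 1) 1) K)
    (hlt : 2 * (K : Int) < n) : canonical_subset t n = t := by
  obtain ⟨hsub, hlen, -, -⟩ := comb_mem_facts ht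
  have hc := complement_length hsub
  unfold canonical_subset
  have : t.length < (pyComplement t n).length := by omega
  simp [this]

-- canonical_subset above the half line: the complement, a strictly shorter set
theorem canon_gt {n : Int} {K : Nat} {t : List Int} (h2 : 2 ≤ (K : Int)) (hn : (K : Int) ≤ n - 2)
    (ht : t ∈ PySem.List.combinations (PySem.List.pyRange 1 (n + 1) 1) K)
    (hgt : n < 2 * (K : Int)) : canonical_subset t n = pyComplement t n ∧ pyComplement t n ≠ t := by
  obtain ⟨hsub, hlen, -, -⟩ := comb_mem_facts ht
  have hc := complement_length hsub
  have h1 : ¬ t.length < (pyComplement t n).length := by omega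
  have hh2 : (pyComplement t n).length < t.length := by omega
  constructor
  · unfold canonical_subset; simp [h1, hh2]
  · intro he
    have := congrArg List.length he
    omega

theorem comp_head_ge2 {n : Int} {t : List Int} (h1 : (1 : Int) ∈ t) :
    ∀ x ∈ pyComplement t n, 2 ≤ x := by
  intro x hx
  obtain ⟨hxR, hxt⟩ := List.mem_filter.mp hx
  have := PySem.List.mem_pyRange_one.mp hxR
  have hne : x ≠ 1 := by
    intro rfl_; subst rfl_
    simp [h1] at hxt
  omega

-- canonical_subset on the half line, 1 ∈ t: the subset itself
theorem canon_eq_mem {n : Int} {K : Nat} {t : List Int} (h2 : 2 ≤ (K : Int))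
    (ht : t ∈ PySem.List.combinations (PySem.List.pyRange 1 (n + 1) 1) K)
    (heq : 2 * (K : Int) = n) (h1 : (1 : Int) ∈ t) : canonical_subset t n = t := by
  obtain ⟨hsub, hlen, hp, hall⟩ := comb_mem_facts ht
  have hc := complement_length hsub
  have hle : ¬ t.length < (pyComplement t n).length := by omega
  have hge : ¬ (pyComplement t n).length < t.length := by omega
  obtain ⟨tt, htt⟩ := head_one hp (fun x hx => (hall x hx).1) h1
  have hcne : pyComplement t n ≠ [] := by
    intro he; rw [he] at hc; simp at hc; omega
  obtain ⟨c, cs, hcs⟩ := List.exists_cons_of_ne_nil hcne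
  have hcge : 2 ≤ c := comp_head_ge2 h1 c (by rw [hcs]; simp)
  have hlex : pyLexLe t (pyComplement t n) = true := by
    rw [hcs, htt]
    simp only [pyLexLe]
    have : (1:Int) < c := by omega
    simp [this]
  unfold canonical_subset
  simp [hle, hge, hlex]

-- canonical_subset on the half line, 1 ∉ t: the complement, which starts with 1
theorem canon_eq_not_mem {n : Int} {K : Nat} {t : List Int} (h2 : 2 ≤ (K : Int))
    (ht : t ∈ PySem.List.combinations (PySem.List.pyRange 1 (n + 1) 1) K)
    (heq : 2 * (K : Int) = n) (h1 : (1 : Int) ∉ t) :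
    canonical_subset t n = pyComplement t n ∧ (∃ cc, pyComplement t n = 1 :: cc) := by
  obtain ⟨hsub, hlen, hp, hall⟩ := comb_mem_facts ht
  have hc := complement_length hsub
  have hle : ¬ t.length < (pyComplement t n).length := by omega
  have hge : ¬ (pyComplement t n).length < t.length := by omega
  have hcons : ∃ cc, pyComplement t n = 1 :: cc := by
    unfold pyComplement
    rw [PySem.List.pyRange_one_cons (by omega : (1:Int) < n + 1)]
    have hn1 : ¬ t.contains 1 := by simp [h1]
    simp only [List.filter_cons, hn1]
    exact ⟨_, rfl⟩
  obtain ⟨cc, hcc⟩ := hcons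
  have htne : t ≠ [] := by intro he; rw [he] at hlen; simp at hlen; omega
  obtain ⟨h, tt, hht⟩ := List.exists_cons_of_ne_nil htne
  have hhge : 2 ≤ h := by
    have := (hall h (by rw [hht]; simp)).1
    have hne : h ≠ 1 := by intro he; exact h1 (by rw [hht, he]; simp)
    omega
  have hlex : pyLexLe t (pyComplement t n) = false := by
    rw [hcc, hht]
    simp only [pyLexLe]
    have h1' : ¬ h < (1:Int) := by omega
    have h2' : (1:Int) < h := by omega
    simp [h1', h2']
  refine ⟨?_, ⟨cc, hcc⟩⟩
  unfold canonical_subset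
  simp [hle, hge, hlex]

-- the complement of a K-combination is an (n-K)-combination
theorem complement_mem_combinations {n : Int} {K : Nat} {t : List Int}
    (ht : t ∈ PySem.List.combinations (PySem.List.pyRange 1 (n + 1) 1) K) :
    pyComplement t n ∈ PySem.List.combinations (PySem.List.pyRange 1 (n + 1) 1) (n.toNat - K) := by
  have hsub := PySem.List.sublist_of_mem_combinations ht
  have hlen := PySem.List.length_of_mem_combinations ht
  rw [PySem.List.mem_combinations_iff]
  exact ⟨List.filter_sublist, by rw [complement_length hsub, hlen]⟩

-- CRUX: the `canon not in seen` guard is exactly the test `canon == subset`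
theorem crux {n k : Int} (h2 : 2 ≤ k) (hn : k ≤ n - 2) {P rest : List (List Int)} {t : List Int}
    (hsplit : PySem.List.combinations (PySem.List.pyRange 1 (n + 1) 1) k.toNat = P ++ t :: rest)
    {S : PySem.Set (List Int)} (hS : ∀ x, x ∈ S ↔ Emit n k x ∨ (x ∈ P ∧ canonical_subset x n = x)) :
    (canonical_subset t n ∈ S) ↔ canonical_subset t n ≠ t := by
  have hKk : ((k.toNat : Int)) = k := by omega
  have ht : t ∈ PySem.List.combinations (PySem.List.pyRange 1 (n + 1) 1) k.toNat := by
    rw [hsplit]; exact List.mem_append.mpr (Or.inr (by simp))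
  obtain ⟨hsub, hlen, hp, hall⟩ := comb_mem_facts ht
  have hpw := pairwise_lex_combinations _ (PySem.List.pairwise_lt_pyRange_one 1 (n + 1)) k.toNat
  rw [hsplit, List.pairwise_append] at hpw
  obtain ⟨hPpw, hTRpw, hcross⟩ := hpw
  have hPt : ∀ a ∈ P, List.Lex (· < ·) a t := fun a ha => hcross a ha t (by simp)
  have hTrest : ∀ b ∈ rest, List.Lex (· < ·) t b := (List.pairwise_cons.mp hTRpw).1
  -- t is not in S when it is its own canonical representative
  have htnotS : t ∉ S := by
    intro hm
    rcases (hS t).mp hm with ⟨j, hj2, hjk, hjmem, -⟩ | ⟨htP, -⟩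
    · have := (comb_mem_facts hjmem).2.1
      omega
    · exact lex_irrefl t (hPt t htP)
  rcases lt_trichotomy (2 * k) n with hlt | heq | hgt
  · rw [canon_lt (by omega) ht (by omega)]
    simp [htnotS]
  · by_cases h1 : (1 : Int) ∈ t
    · rw [canon_eq_mem (by omega) ht (by omega) h1]
      simp [htnotS]
    · obtain ⟨hcanon, cc, hcc⟩ := canon_eq_not_mem (by omega) ht (by omega) h1
      rw [hcanon]
      have hcompne : pyComplement t n ≠ t := by
        intro he
        rw [he] at hcc
        exact h1 (by rw [hcc]; simp)
      have hcm : pyComplement t n ∈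
          PySem.List.combinations (PySem.List.pyRange 1 (n + 1) 1) k.toNat := by
        have h := complement_mem_combinations ht
        have : n.toNat - k.toNat = k.toNat := by omega
        rwa [this] at h
      have hcmem : pyComplement t n ∈ S := by
        apply (hS _).mpr
        right
        refine ⟨?_, canon_eq_mem (by omega) hcm (by omega) (by rw [hcc]; simp)⟩
        rw [hsplit] at hcm
        rcases List.mem_append.mp hcm with hmP | hmTR
        · exact hmP
        · rcases List.mem_cons.mp hmTR with hEq | hmrest
          · exact absurd hEq hcompne
          · exfalso
            have hlex := hTrest _ hmrest
            rw [hcc] at hlex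
            cases t with
            | nil => simp at hlen; omega
            | cons h tt =>
              have hh1 : 1 ≤ h := (hall h (by simp)).1
              have hhne : h ≠ 1 := fun he => h1 (by rw [he] at *; simp)
              cases hlex with
              | rel hr => omega
              | cons _ => exact hhne rfl
      simp [hcmem, hcompne]
  · obtain ⟨hcanon, hne⟩ := canon_gt (by omega) (by omega) ht (by omega)
    rw [hcanon]
    have hcmem : pyComplement t n ∈ S := by
      apply (hS _).mpr
      left
      refine ⟨n.toNat - k.toNat, by omega, by omega, complement_mem_combinations ht, ?_⟩
      exact canon_lt (by omega) (complement_mem_combinations ht) (by omega)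
    simp [hcmem, hne]

-- the inner loop appends exactly the canonical subsets of the block, in order
theorem inner_spec {n k : Int} (h2 : 2 ≤ k) (hn : k ≤ n - 2) (suf : List (List Int)) :
    ∀ (P : List (List Int)),
    PySem.List.combinations (PySem.List.pyRange 1 (n + 1) 1) k.toNat = P ++ suf →
    ∀ (L : List (List Int)) (S : PySem.Set (List Int)),
    (∀ x, x ∈ S ↔ Emit n k x ∨ (x ∈ P ∧ canonical_subset x n = x)) →
    (suf.foldl (mandelStep n) (L, S)).1
        = L ++ suf.filter (fun t => decide (canonical_subset t n = t)) ∧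
      ∀ x, x ∈ (suf.foldl (mandelStep n) (L, S)).2
        ↔ Emit n k x ∨ (x ∈ P ++ suf ∧ canonical_subset x n = x) := by
  induction suf with
  | nil =>
    intro P hsplit L S hS
    simpa using hS
  | cons t rest ih =>
    intro P hsplit L S hS
    have hguard := crux h2 hn hsplit hS
    have hsplit' : PySem.List.combinations (PySem.List.pyRange 1 (n + 1) 1) k.toNat
        = (P ++ [t]) ++ rest := by rw [hsplit]; simp
    by_cases hcan : canonical_subset t n = t
    · have hnotmem : canonical_subset t n ∉ S := fun hm => (hguard.mp hm) hcan
      have hnm : t ∉ S := by rw [← hcan]; exact hnotmem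
      have hstep : mandelStep n (L, S) t = (L ++ [t], PySem.Set.add S t) := by
        simp only [mandelStep, hcan, if_neg hnm]
      rw [List.foldl_cons, hstep]
      have hS' : ∀ x, x ∈ PySem.Set.add S t
          ↔ Emit n k x ∨ (x ∈ P ++ [t] ∧ canonical_subset x n = x) := by
        intro x
        rw [PySem.Set.mem_add, hS x]
        constructor
        · rintro ((h | ⟨hP, hc⟩) | rfl)
          · exact Or.inl h
          · exact Or.inr ⟨by simp [hP], hc⟩
          · exact Or.inr ⟨by simp, hcan⟩
        · rintro (h | ⟨hmem, hc⟩)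
          · exact Or.inl (Or.inl h)
          · rcases List.mem_append.mp hmem with hP | hx
            · exact Or.inl (Or.inr ⟨hP, hc⟩)
            · exact Or.inr (by simpa using hx)
      obtain ⟨h1, hmem2⟩ := ih (P ++ [t]) hsplit' (L ++ [t]) (PySem.Set.add S t) hS'
      simp only [List.append_assoc, List.singleton_append] at hmem2
      refine ⟨?_, hmem2⟩
      rw [h1, List.filter_cons]
      simp [hcan]
    · have hmem : canonical_subset t n ∈ S := hguard.mpr hcan
      have hstep : mandelStep n (L, S) t = (L, S) := by
        simp only [mandelStep, if_pos hmem]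
      rw [List.foldl_cons, hstep]
      have hS' : ∀ x, x ∈ S ↔ Emit n k x ∨ (x ∈ P ++ [t] ∧ canonical_subset x n = x) := by
        intro x
        rw [hS x]
        constructor
        · rintro (h | ⟨hP, hc⟩)
          · exact Or.inl h
          · exact Or.inr ⟨by simp [hP], hc⟩
        · rintro (h | ⟨hmem', hc⟩)
          · exact Or.inl h
          · rcases List.mem_append.mp hmem' with hP | hx
            · exact Or.inr ⟨hP, hc⟩
            · exact absurd hc (by simp at hx; rw [hx]; exact hcan)
      obtain ⟨h1, hmem2⟩ := ih (P ++ [t]) hsplit' L S hS'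
      simp only [List.append_assoc, List.singleton_append] at hmem2
      refine ⟨?_, hmem2⟩
      rw [h1, List.filter_cons]
      simp [hcan]

-- the canonical subsets of block k are exactly what B emits for k
theorem block_filter {n k : Int} (h2 : 2 ≤ k) (hn : k ≤ n - 2) :
    (PySem.List.combinations (PySem.List.pyRange 1 (n + 1) 1) k.toNat).filter
        (fun t => decide (canonical_subset t n = t))
      = if 2 * k < n then PySem.List.combinations (PySem.List.pyRange 1 (n + 1) 1) k.toNat
        else if 2 * k = n then
          (PySem.List.combinations (PySem.List.pyRange 2 (n + 1) 1) (k.toNat - 1)).map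
            (fun rest => 1 :: rest)
        else [] := by
  rcases lt_trichotomy (2 * k) n with hlt | heq | hgt
  · rw [if_pos hlt]
    apply List.filter_eq_self.mpr
    intro t ht
    simp [canon_lt (by omega) ht (by omega)]
  · rw [if_neg (by omega), if_pos heq]
    have hcons : PySem.List.pyRange 1 (n + 1) 1 = 1 :: PySem.List.pyRange 2 (n + 1) 1 :=
      PySem.List.pyRange_one_cons (by omega)
    have hk1 : k.toNat = (k.toNat - 1) + 1 := by omega
    rw [hk1, hcons, PySem.List.combinations_cons_succ, List.filter_append]
    have hmap : ∀ u ∈ PySem.List.combinations (PySem.List.pyRange 2 (n + 1) 1) (k.toNat - 1),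
        (1 :: u) ∈ PySem.List.combinations (PySem.List.pyRange 1 (n + 1) 1) k.toNat := by
      intro u hu
      rw [PySem.List.mem_combinations_iff] at hu ⊢
      rw [hcons]
      exact ⟨List.Sublist.cons₂ 1 hu.1, by simp [hu.2]; omega⟩
    have h1 : (List.map (fun x => 1 :: x)
          (PySem.List.combinations (PySem.List.pyRange 2 (n + 1) 1) (k.toNat - 1))).filter
            (fun t => decide (canonical_subset t n = t))
        = List.map (fun x => 1 :: x)
            (PySem.List.combinations (PySem.List.pyRange 2 (n + 1) 1) (k.toNat - 1)) := by
      apply List.filter_eq_self.mpr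
      intro t ht
      obtain ⟨u, hu, rfl⟩ := List.mem_map.mp ht
      simp [canon_eq_mem (by omega) (hmap u hu) (by omega) (by simp)]
    have h0 : (PySem.List.combinations (PySem.List.pyRange 2 (n + 1) 1) ((k.toNat - 1) + 1)).filter
            (fun t => decide (canonical_subset t n = t)) = [] := by
      apply List.filter_eq_nil_iff.mpr
      intro t ht
      rw [PySem.List.mem_combinations_iff] at ht
      have h1t : (1 : Int) ∉ t := by
        intro hmem
        have := (PySem.List.mem_pyRange_one.mp (ht.1.subset hmem)).1
        omega
      have htK : t ∈ PySem.List.combinations (PySem.List.pyRange 1 (n + 1) 1) k.toNat := by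
        rw [PySem.List.mem_combinations_iff, hcons]
        exact ⟨ht.1.cons 1, by rw [ht.2]; omega⟩
      obtain ⟨hc, cc, hcc⟩ := canon_eq_not_mem (by omega) htK (by omega) h1t
      simp only [decide_eq_true_eq]
      rw [hc]
      intro he
      rw [he] at hcc
      exact h1t (by rw [hcc]; simp)
    rw [h1, h0, List.append_nil]
    simp
  · rw [if_neg (by omega), if_neg (by omega)]
    apply List.filter_eq_nil_iff.mpr
    intro t ht
    obtain ⟨hc, hne⟩ := canon_gt (by omega) (by omega) ht (by omega)
    simp [hc, hne]


theorem emit_succ {n K : Int} (h2 : 2 ≤ K) (x : List Int) :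
    Emit n (K + 1) x ↔ Emit n K x ∨
      (x ∈ PySem.List.combinations (PySem.List.pyRange 1 (n + 1) 1) K.toNat ∧
        canonical_subset x n = x) := by
  constructor
  · rintro ⟨j, hj2, hjK, hjmem, hjc⟩
    by_cases hj : (j : Int) < K
    · exact Or.inl ⟨j, hj2, hj, hjmem, hjc⟩
    · have : j = K.toNat := by omega
      subst this
      exact Or.inr ⟨hjmem, hjc⟩
  · rintro (⟨j, hj2, hjK, hjmem, hjc⟩ | ⟨hmem, hc⟩)
    · exact ⟨j, hj2, by omega, hjmem, hjc⟩
    · exact ⟨K.toNat, by omega, by omega, hmem, hc⟩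

theorem outer_spec {n upper : Int} (hu : upper ≤ n - 2) :
    ∀ (m : Nat) (K : Int), 2 ≤ K → (upper + 1 - K).toNat = m →
    ∀ (L : List (List Int)) (S : PySem.Set (List Int)), (∀ x, x ∈ S ↔ Emit n K x) →
    ((PySem.List.pyRange K (upper + 1) 1).foldl (mandelBlock n) (L, S)).1
      = (PySem.List.pyRange K (upper + 1) 1).foldl (mandelBlockAlt n) L := by
  intro m
  induction m with
  | zero =>
    intro K hK hm L S hS
    rw [PySem.List.pyRange_one_eq_nil (by omega)]
    rfl
  | succ m ih =>
    intro K hK hm L S hS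
    have hKu : K < upper + 1 := by omega
    have hKn : K ≤ n - 2 := by omega
    rw [PySem.List.pyRange_one_cons hKu]
    simp only [List.foldl_cons]
    obtain ⟨h1, h2'⟩ := inner_spec hK hKn
      (PySem.List.combinations (PySem.List.pyRange 1 (n + 1) 1) K.toNat) [] rfl L S
      (by intro x; rw [hS x]; simp)
    have hblock : mandelBlock n (L, S) K
        = ((mandelBlock n (L, S) K).1, (mandelBlock n (L, S) K).2) := rfl
    rw [hblock]
    have halt : mandelBlockAlt n L K
        = L ++ (PySem.List.combinations (PySem.List.pyRange 1 (n + 1) 1) K.toNat).filter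
            (fun t => decide (canonical_subset t n = t)) := by
      unfold mandelBlockAlt
      rw [block_filter hK hKn]
      split_ifs <;> simp
    have hfst : (mandelBlock n (L, S) K).1 = mandelBlockAlt n L K := by
      rw [halt]; exact h1
    rw [hfst]
    apply ih (K + 1) (by omega) (by omega)
    intro x
    have := h2' x
    simp only [List.nil_append] at this
    rw [show (mandelBlock n (L, S) K).2 = (List.foldl (mandelStep n) (L, S)
      (PySem.List.combinations (PySem.List.pyRange 1 (n + 1) 1) K.toNat)).2 from rfl, this]
    exact (emit_succ hK x).symm

-- ===== VERDICT (by name: the statement is the Claim_ definition above) =====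
theorem generate_mandelstam_labels_spec : Claim_equal_generate_mandelstam_labels := by
  intro n m _
  unfold Spec_generate_mandelstam_labels generate_mandelstam_labels generate_mandelstam_labels_alt
  exact outer_spec (min_le_right m (n - 2)) _ 2 (by norm_num) rfl [] PySem.Set.empty
    (by intro x; simp [PySem.Set.empty, Emit]; intro j h1 h2; omega)
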